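-- pv_equiv track=rewrite | github.com/g0yujin/CodingTest | 서연/0817/17276.py | antiClock
-- ===== SOURCE A (Python) =====
-- def antiClock(matrix, n):
--     newMatrix = [[0] * n for _ in range(n)]
--
--     for i in range(n):
--         for j in range(n):
--
--             if i == j: # 주대각선
--                 newMatrix[n//2][j] = matrix[i][j]
--
--             elif i == n-j-1: # 부대각선
--                 newMatrix[i][n//2] = matrix[i][j]
--
--             elif i == n//2: # 가운데 행
--                 newMatrix[n-j-1][j] = matrix[i][j]
--
--             elif j == n//2: # 가운데 열
--                 newMatrix[i][i] = matrix[i][j]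
--
--             else:
--                 newMatrix[i][j] = matrix[i][j]
--
--     return newMatrix
-- ===== SOURCE B (Python) =====
-- def antiClock(matrix, n):
--     new = [[matrix[i][j] for j in range(n)] for i in range(n)]
--     c = n // 2
--     for i in range(n):
--         new[i][i] = matrix[i][c]
--     for j in range(n):
--         new[n-1-j][j] = matrix[c][j]
--     for i in range(n):
--         new[i][c] = matrix[i][n-1-i]
--     for i in range(n):
--         new[c][i] = matrix[i][i]
--     return new
-- ===== Notes on version B (the rewrite author's own statement) =====
-- stated objective: simpler
-- what changed: Instead of classifying all n^2 cells with a 5-way if/elif chain into a zero matrix, B copies the n-by-n prefix and rewrites only the cross (diagonals, center row, center column) with four plain linear loops, ordered so the last write is the rotated value.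
-- outside the precondition, e.g. on antiClock([[1, 2], [3, 4]], 2): A returns [[0, 2], [1, 4]], B returns [[2, 2], [1, 4]]; on antiClock([[1, 2, 3], [4, 5, 6]], 2): A returns [[0, 2], [1, 5]], B returns [[2, 2], [1, 5]]
import Mathlib
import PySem

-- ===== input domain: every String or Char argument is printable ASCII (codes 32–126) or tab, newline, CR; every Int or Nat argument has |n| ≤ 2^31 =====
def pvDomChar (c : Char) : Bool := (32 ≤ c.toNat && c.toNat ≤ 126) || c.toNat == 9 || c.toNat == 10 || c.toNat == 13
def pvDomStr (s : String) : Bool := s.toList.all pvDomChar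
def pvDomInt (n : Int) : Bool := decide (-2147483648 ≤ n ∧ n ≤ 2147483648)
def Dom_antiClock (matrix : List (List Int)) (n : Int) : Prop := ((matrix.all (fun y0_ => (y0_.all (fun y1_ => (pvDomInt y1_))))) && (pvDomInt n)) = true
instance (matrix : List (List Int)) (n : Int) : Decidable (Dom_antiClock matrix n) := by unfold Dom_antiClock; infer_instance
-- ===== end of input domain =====

-- B copies the matrix and rewrites only the cross (diagonals, center row, center column)
-- with four linear loops instead of classifying all n^2 cells into a zero matrix (simpler).

-- Python assignment m[a][b] = v for non-negative in-range a, b (the only indices the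
-- admitted inputs produce; exact there).
def pySet2 (m : List (List Int)) (a b v : Int) : List (List Int) :=
  m.set a.toNat ((m.getD a.toNat []).set b.toNat v)

-- ===== PORT A =====
def antiClock (matrix : List (List Int)) (n : Int) : List (List Int) :=
  let newMatrix := (PySem.List.pyRange 0 n 1).map (fun _ => List.replicate n.toNat (0 : Int))
  (PySem.List.pyRange 0 n 1).foldl (fun nm i =>
    (PySem.List.pyRange 0 n 1).foldl (fun nm j =>
      if i = j then
        pySet2 nm (PySem.Int.floordiv n 2) j (PySem.List.pyGetD (PySem.List.pyGetD matrix i []) j 0)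
      else if i = n - j - 1 then
        pySet2 nm i (PySem.Int.floordiv n 2) (PySem.List.pyGetD (PySem.List.pyGetD matrix i []) j 0)
      else if i = PySem.Int.floordiv n 2 then
        pySet2 nm (n - j - 1) j (PySem.List.pyGetD (PySem.List.pyGetD matrix i []) j 0)
      else if j = PySem.Int.floordiv n 2 then
        pySet2 nm i i (PySem.List.pyGetD (PySem.List.pyGetD matrix i []) j 0)
      else
        pySet2 nm i j (PySem.List.pyGetD (PySem.List.pyGetD matrix i []) j 0)) nm) newMatrix

-- ===== PORT B =====
def antiClock_alt (matrix : List (List Int)) (n : Int) : List (List Int) :=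
  let new0 := (PySem.List.pyRange 0 n 1).map (fun i =>
    (PySem.List.pyRange 0 n 1).map (fun j =>
      PySem.List.pyGetD (PySem.List.pyGetD matrix i []) j 0))
  let c := PySem.Int.floordiv n 2
  let m1 := (PySem.List.pyRange 0 n 1).foldl (fun nm i =>
    pySet2 nm i i (PySem.List.pyGetD (PySem.List.pyGetD matrix i []) c 0)) new0
  let m2 := (PySem.List.pyRange 0 n 1).foldl (fun nm j =>
    pySet2 nm (n - 1 - j) j (PySem.List.pyGetD (PySem.List.pyGetD matrix c []) j 0)) m1
  let m3 := (PySem.List.pyRange 0 n 1).foldl (fun nm i =>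
    pySet2 nm i c (PySem.List.pyGetD (PySem.List.pyGetD matrix i []) (n - 1 - i) 0)) m2
  (PySem.List.pyRange 0 n 1).foldl (fun nm i =>
    pySet2 nm c i (PySem.List.pyGetD (PySem.List.pyGetD matrix i []) i 0)) m3

-- ===== PRECONDITION & SPEC =====
-- Pre_ admits every input A accepts (n ≤ 0, or n rows each with at least n entries)
-- except even n ≥ 2, outside the BOJ-17276 domain (n is guaranteed odd there), where A's
-- returned matrix keeps a never-written 0 cell at (n/2-1, n/2-1) — an accident of A's
-- write pattern no caller would specify.
def Pre_antiClock (matrix : List (List Int)) (n : Int) : Prop :=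
  n ≤ 0 ∨ (n % 2 = 1 ∧ n ≤ (matrix.length : Int) ∧
    ∀ row ∈ matrix.take n.toNat, n ≤ (row.length : Int))
instance (matrix : List (List Int)) (n : Int) : Decidable (Pre_antiClock matrix n) := by
  unfold Pre_antiClock; infer_instance

def pvWitness_antiClock : List (List Int) × Int :=
  ([[1, 2, 3], [4, 5, 6], [7, 8, 9]], 3)

def Spec_antiClock (matrix : List (List Int)) (n : Int) (out : List (List Int)) : Prop := out = antiClock_alt matrix n
instance (matrix : List (List Int)) (n : Int) (out : List (List Int)) : Decidable (Spec_antiClock matrix n out) := by unfold Spec_antiClock; infer_instance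

-- ===== CLAIM (what is proved, stated in full; the proofs are below) =====
def Claim_equal_antiClock : Prop := ∀ (matrix : List (List Int)) (n : Int), Dom_antiClock matrix n → Pre_antiClock matrix n → Spec_antiClock matrix n (antiClock matrix n)

-- ===== LEMMAS AND PROOFS =====

def getCell (m : List (List Int)) (r c : Nat) : Int := (m.getD r []).getD c 0

def Shape (m : List (List Int)) (N : Nat) : Prop :=
  m.length = N ∧ ∀ row ∈ m, row.length = N

theorem set2_shape (m : List (List Int)) (N : Nat) (a b v : Int) (h : Shape m N) :
    Shape (pySet2 m a b v) N := by
  obtain ⟨h1, h2⟩ := h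
  by_cases ham : a.toNat < m.length
  · refine ⟨by simp [pySet2, h1], ?_⟩
    intro row hrow
    rcases List.mem_or_eq_of_mem_set hrow with h | h
    · exact h2 _ h
    · subst h
      rw [List.getD_eq_getElem _ _ ham, List.length_set]
      exact h2 _ (List.getElem_mem ham)
  · rw [pySet2, List.set_eq_of_length_le (by omega)]
    exact ⟨h1, h2⟩

theorem set2_cell (m : List (List Int)) (N : Nat) (a b v : Int) (r c : Nat)
    (h : Shape m N) (hr : r < N) (hc : c < N) (ha : 0 ≤ a) (hb : 0 ≤ b) :
    getCell (pySet2 m a b v) r c = if a = (r : Int) ∧ b = (c : Int) then v else getCell m r c := by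
  obtain ⟨h1, h2⟩ := h
  have hrm : r < m.length := by omega
  have hcell : getCell (pySet2 m a b v) r c = ((pySet2 m a b v).getD r []).getD c 0 := rfl
  by_cases har : a = (r : Int)
  · have hat : a.toNat = r := by omega
    have hrl : m[r].length = N := h2 _ (List.getElem_mem hrm)
    have hset : (pySet2 m a b v).getD r [] = (m[r]).set b.toNat v := by
      rw [pySet2, hat, List.getD_eq_getElem _ _ (by rw [List.length_set]; exact hrm),
        List.getElem_set_self (by rw [List.length_set]; exact hrm),
        List.getD_eq_getElem _ _ hrm]
    rw [hcell, hset]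
    by_cases hbc : b = (c : Int)
    · have hbt : b.toNat = c := by omega
      rw [hbt, List.getD_eq_getElem _ _ (by rw [List.length_set]; omega),
        List.getElem_set_self (by rw [List.length_set]; omega)]
      simp [har, hbc]
    · have hbt : b.toNat ≠ c := by omega
      rw [List.getD_eq_getElem _ _ (by rw [List.length_set]; omega),
        List.getElem_set_ne hbt (by rw [List.length_set]; omega)]
      simp only [har, hbc, and_false, if_false, getCell, List.getD_eq_getElem _ _ hrm,
        List.getD_eq_getElem _ _ (show c < m[r].length by omega)]
  · have hat : a.toNat ≠ r := by omega
    rw [hcell]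
    have hunch : (pySet2 m a b v).getD r [] = m.getD r [] := by
      rw [pySet2, List.getD_eq_getElem _ _ (by rw [List.length_set]; exact hrm),
        List.getElem_set_ne hat (by rw [List.length_set]; exact hrm),
        List.getD_eq_getElem _ _ hrm]
    rw [hunch]
    simp [getCell, har]

theorem wf_shape {α : Type} (L : List α) (t : α → Nat × Nat) (f : α → Int)
    (m0 : List (List Int)) (N : Nat) (h : Shape m0 N) :
    Shape (L.foldl (fun m p => pySet2 m ((t p).1 : Int) ((t p).2 : Int) (f p)) m0) N := by
  induction L generalizing m0 with
  | nil => exact h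
  | cons p L ih => exact ih _ (set2_shape _ _ _ _ _ h)

theorem wf_miss {α : Type} (L : List α) (t : α → Nat × Nat) (f : α → Int)
    (m0 : List (List Int)) (N : Nat) (r c : Nat)
    (h : Shape m0 N) (hr : r < N) (hc : c < N)
    (hmiss : ∀ p ∈ L, t p ≠ (r, c)) :
    getCell (L.foldl (fun m p => pySet2 m ((t p).1 : Int) ((t p).2 : Int) (f p)) m0) r c
      = getCell m0 r c := by
  induction L generalizing m0 with
  | nil => rfl
  | cons p L ih =>
    rw [List.foldl_cons, ih _ (set2_shape _ _ _ _ _ h)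
      (fun q hq => hmiss q (List.mem_cons_of_mem _ hq)),
      set2_cell _ N _ _ _ _ _ h hr hc (by positivity) (by positivity)]
    have : ¬(((t p).1 : Int) = (r : Int) ∧ ((t p).2 : Int) = (c : Int)) := by
      intro ⟨e1, e2⟩
      exact hmiss p (List.mem_cons_self) (Prod.ext (by omega) (by omega))
    rw [if_neg this]

theorem wf_hit {α : Type} (L : List α) (t : α → Nat × Nat) (f : α → Int)
    (m0 : List (List Int)) (N : Nat) (r c : Nat)
    (h : Shape m0 N) (hr : r < N) (hc : c < N)
    (hinj : ∀ p ∈ L, ∀ q ∈ L, t p = t q → p = q)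
    (p : α) (hp : p ∈ L) (htp : t p = (r, c)) :
    getCell (L.foldl (fun m p => pySet2 m ((t p).1 : Int) ((t p).2 : Int) (f p)) m0) r c
      = f p := by
  induction L generalizing m0 with
  | nil => cases hp
  | cons a L ih =>
    rw [List.foldl_cons]
    have hshape' := set2_shape m0 N ((t a).1 : Int) ((t a).2 : Int) (f a) h
    by_cases hq : ∃ q ∈ L, t q = (r, c)
    · obtain ⟨q, hqL, hqt⟩ := hq
      have hpq : p = q := hinj p hp q (List.mem_cons_of_mem _ hqL) (by rw [htp, hqt])
      exact hpq ▸ ih _ hshape'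
        (fun x hx y hy e => hinj x (List.mem_cons_of_mem _ hx) y (List.mem_cons_of_mem _ hy) e)
        (hpq ▸ hqL)
    · have hpa : p = a := by
        rcases List.mem_cons.mp hp with h' | h'
        · exact h'
        · exact absurd ⟨p, h', htp⟩ hq
      rw [wf_miss L t f _ N r c hshape' hr hc (fun q hqL e => hq ⟨q, hqL, e⟩)]
      rw [set2_cell _ N _ _ _ _ _ h hr hc (by positivity) (by positivity)]
      have : ((t a).1 : Int) = (r : Int) ∧ ((t a).2 : Int) = (c : Int) := by
        rw [hpa] at htp; rw [htp]; exact ⟨rfl, rfl⟩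
      rw [if_pos this, hpa]

theorem foldl_foldl {α β : Type} (L1 : List α) (L2 : α → List β)
    (g : List (List Int) → α → β → List (List Int)) (init : List (List Int)) :
    L1.foldl (fun m i => (L2 i).foldl (fun m j => g m i j) m) init
      = (L1.flatMap (fun i => (L2 i).map (Prod.mk i))).foldl (fun m p => g m p.1 p.2) init := by
  induction L1 generalizing init with
  | nil => rfl
  | cons a L ih =>
    rw [List.foldl_cons, List.flatMap_cons, List.foldl_append, List.foldl_map, ih]

theorem shape_ext (m1 m2 : List (List Int)) (N : Nat)
    (h1 : Shape m1 N) (h2 : Shape m2 N)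
    (h : ∀ r < N, ∀ c < N, getCell m1 r c = getCell m2 r c) : m1 = m2 := by
  obtain ⟨l1, r1⟩ := h1
  obtain ⟨l2, r2⟩ := h2
  refine List.ext_getElem (by omega) (fun i hi1 hi2 => ?_)
  have hi : i < N := by omega
  refine List.ext_getElem ?_ (fun j hj1 hj2 => ?_)
  · rw [r1 _ (List.getElem_mem hi1), r2 _ (List.getElem_mem hi2)]
  · have hj : j < N := by rw [r1 _ (List.getElem_mem hi1)] at hj1; exact hj1
    have := h i hi j hj
    rwa [getCell, getCell, List.getD_eq_getElem _ _ hi1, List.getD_eq_getElem _ _ hi2,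
      List.getD_eq_getElem _ _ hj1, List.getD_eq_getElem _ _ hj2] at this

-- Where A's if/elif chain sends cell (i, j).
def TA (N : Nat) (p : Nat × Nat) : Nat × Nat :=
  if p.1 = p.2 then (N / 2, p.2)
  else if p.1 + p.2 + 1 = N then (p.1, N / 2)
  else if p.1 = N / 2 then (N - 1 - p.2, p.2)
  else if p.2 = N / 2 then (p.1, p.1)
  else p

-- Inverse of TA on [0,N)² for odd N: where the value at (r, c) comes from.
def TS (N : Nat) (q : Nat × Nat) : Nat × Nat :=
  if q.1 = N / 2 then (q.2, q.2)
  else if q.2 = N / 2 then (q.1, N - 1 - q.1)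
  else if q.1 = q.2 then (q.1, N / 2)
  else if q.1 + q.2 + 1 = N then (N / 2, q.2)
  else q

theorem TS_TA (N : Nat) (p : Nat × Nat) (hodd : N % 2 = 1)
    (h1 : p.1 < N) (h2 : p.2 < N) : TS N (TA N p) = p := by
  obtain ⟨i, j⟩ := p
  simp only [TS, TA]
  split_ifs <;> simp at * <;> omega

theorem TS_range (N : Nat) (q : Nat × Nat) (hodd : N % 2 = 1)
    (h1 : q.1 < N) (h2 : q.2 < N) : (TS N q).1 < N ∧ (TS N q).2 < N := by
  obtain ⟨r, c⟩ := q
  simp only [TS]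
  split_ifs <;> simp at * <;> omega

set_option maxRecDepth 4000 in
theorem TA_TS (N : Nat) (q : Nat × Nat) (hodd : N % 2 = 1)
    (h1 : q.1 < N) (h2 : q.2 < N) : TA N (TS N q) = q := by
  obtain ⟨r, c⟩ := q
  simp only [TS]
  split_ifs <;> simp only [TA] <;> split_ifs <;> simp at * <;> omega

def LA (N : Nat) : List (Nat × Nat) :=
  (List.range N).flatMap (fun i => (List.range N).map (Prod.mk i))

theorem mem_LA (N : Nat) (p : Nat × Nat) : p ∈ LA N ↔ p.1 < N ∧ p.2 < N := by
  obtain ⟨i, j⟩ := p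
  simp only [LA, List.mem_flatMap, List.mem_map, List.mem_range]
  constructor
  · rintro ⟨a, ha, b, hb, e⟩; cases e; exact ⟨ha, hb⟩
  · rintro ⟨hi, hj⟩; exact ⟨i, hi, j, hj, rfl⟩

theorem floordiv_half (N : Nat) : PySem.Int.floordiv (N : Int) 2 = ((N / 2 : Nat) : Int) := by
  exact_mod_cast PySem.Int.floordiv_natCast N 2

theorem antiClock_bridge (matrix : List (List Int)) (N : Nat) :
    antiClock matrix (N : Int)
      = (LA N).foldl
          (fun m p => pySet2 m ((TA N p).1 : Int) ((TA N p).2 : Int) (getCell matrix p.1 p.2))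
          ((List.range N).map (fun _ => List.replicate N (0 : Int))) := by
  unfold antiClock
  simp only [PySem.List.pyRange_zero_natCast, List.foldl_map, List.map_map,
    Int.toNat_natCast]
  refine Eq.trans (PySem.List.foldl_congr_mem _ _
    (fun m (i : Nat) => (List.range N).foldl
      (fun nm (j : Nat) => pySet2 nm ((TA N (i, j)).1 : Int) ((TA N (i, j)).2 : Int)
        (getCell matrix i j)) m) _ ?_) ?_
  · intro acc i hi
    have hi' : i < N := List.mem_range.mp hi
    dsimp only
    refine PySem.List.foldl_congr_mem _ _ _ _ ?_
    intro acc2 j hj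
    have hj' : j < N := List.mem_range.mp hj
    have hv : PySem.List.pyGetD (PySem.List.pyGetD matrix (i : Int) []) (j : Int) 0
        = getCell matrix i j := by
      rw [PySem.List.pyGetD_natCast, PySem.List.pyGetD_natCast]; rfl
    rw [hv, floordiv_half]
    simp only [TA]
    by_cases c1 : i = j
    · subst c1; rw [if_pos rfl, if_pos rfl]
    · rw [if_neg (show ¬((i : Int) = (j : Int)) by omega), if_neg c1]
      by_cases c2 : i + j + 1 = N
      · rw [if_pos (show (i : Int) = (N : Int) - (j : Int) - 1 by omega), if_pos c2]
      · rw [if_neg (show ¬((i : Int) = (N : Int) - (j : Int) - 1) by omega), if_neg c2]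
        by_cases c3 : i = N / 2
        · rw [if_pos (show (i : Int) = ((N / 2 : Nat) : Int) by omega), if_pos c3]
          have : (N : Int) - (j : Int) - 1 = ((N - 1 - j : Nat) : Int) := by omega
          rw [this]
        · rw [if_neg (show ¬((i : Int) = ((N / 2 : Nat) : Int)) by omega), if_neg c3]
          by_cases c4 : j = N / 2
          · rw [if_pos (show (j : Int) = ((N / 2 : Nat) : Int) by omega), if_pos c4]
          · rw [if_neg (show ¬((j : Int) = ((N / 2 : Nat) : Int)) by omega), if_neg c4]
  · rw [foldl_foldl (List.range N) (fun _ => List.range N)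
      (fun m (i : Nat) (j : Nat) => pySet2 m ((TA N (i, j)).1 : Int) ((TA N (i, j)).2 : Int)
        (getCell matrix i j))]
    rfl

theorem antiClock_alt_bridge (matrix : List (List Int)) (N : Nat) :
    antiClock_alt matrix (N : Int)
      = (List.range N).foldl
          (fun m (i : Nat) => pySet2 m ((N / 2 : Nat) : Int) (i : Int) (getCell matrix i i))
          ((List.range N).foldl
            (fun m (i : Nat) => pySet2 m (i : Int) ((N / 2 : Nat) : Int) (getCell matrix i (N - 1 - i)))
            ((List.range N).foldl
              (fun m (j : Nat) => pySet2 m ((N - 1 - j : Nat) : Int) (j : Int) (getCell matrix (N / 2) j))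
              ((List.range N).foldl
                (fun m (i : Nat) => pySet2 m (i : Int) (i : Int) (getCell matrix i (N / 2)))
                ((List.range N).map (fun i => (List.range N).map (fun j => getCell matrix i j)))))) := by
  simp only [antiClock_alt, PySem.List.pyRange_zero_natCast, List.foldl_map, List.map_map,
    Function.comp_def, floordiv_half, PySem.List.pyGetD_natCast]
  rw [PySem.List.foldl_congr_mem (List.range N)
    (fun nm (j : Nat) => pySet2 nm ((N : Int) - 1 - (j : Int)) (j : Int)
      ((matrix.getD (N / 2) []).getD j 0))
    (fun nm (j : Nat) => pySet2 nm ((N - 1 - j : Nat) : Int) (j : Int)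
      (getCell matrix (N / 2) j)) _
    (by
      intro acc j hj
      dsimp only
      have hj' : j < N := List.mem_range.mp hj
      have e : (N : Int) - 1 - (j : Int) = ((N - 1 - j : Nat) : Int) := by omega
      rw [e]; rfl)]
  rw [PySem.List.foldl_congr_mem (List.range N)
    (fun nm (i : Nat) => pySet2 nm (i : Int) (((N / 2 : Nat)) : Int)
      (PySem.List.pyGetD (matrix.getD i []) ((N : Int) - 1 - (i : Int)) 0))
    (fun nm (i : Nat) => pySet2 nm (i : Int) (((N / 2 : Nat)) : Int)
      (getCell matrix i (N - 1 - i))) _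
    (by
      intro acc i hi
      dsimp only
      have hi' : i < N := List.mem_range.mp hi
      have e : (N : Int) - 1 - (i : Int) = ((N - 1 - i : Nat) : Int) := by omega
      rw [e, PySem.List.pyGetD_natCast]; rfl)]
  rfl

theorem A_cell (matrix : List (List Int)) (N r c : Nat) (hodd : N % 2 = 1)
    (hr : r < N) (hc : c < N) :
    getCell (antiClock matrix (N : Int)) r c
      = getCell matrix (TS N (r, c)).1 (TS N (r, c)).2 := by
  rw [antiClock_bridge]
  have hshape0 : Shape ((List.range N).map (fun _ => List.replicate N (0 : Int))) N := by
    constructor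
    · simp
    · intro row hrow
      simp only [List.mem_map] at hrow
      obtain ⟨_, _, e⟩ := hrow
      simp [← e]
  refine wf_hit (LA N) (TA N) (fun p => getCell matrix p.1 p.2) _ N r c hshape0 hr hc
    ?_ (TS N (r, c)) ?_ ?_
  · intro p hp q hq e
    obtain ⟨hp1, hp2⟩ := (mem_LA N p).mp hp
    obtain ⟨hq1, hq2⟩ := (mem_LA N q).mp hq
    rw [← TS_TA N p hodd hp1 hp2, ← TS_TA N q hodd hq1 hq2, e]
  · exact (mem_LA N _).mpr (TS_range N (r, c) hodd hr hc)
  · exact TA_TS N (r, c) hodd hr hc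

theorem m0B_shape (matrix : List (List Int)) (N : Nat) :
    Shape ((List.range N).map (fun i => (List.range N).map (fun j => getCell matrix i j))) N := by
  constructor
  · simp
  · intro row hrow
    simp only [List.mem_map] at hrow
    obtain ⟨_, _, e⟩ := hrow
    simp [← e]

theorem m0B_cell (matrix : List (List Int)) (N r c : Nat) (hr : r < N) (hc : c < N) :
    getCell ((List.range N).map (fun i => (List.range N).map (fun j => getCell matrix i j))) r c
      = getCell matrix r c := by
  have h1 : ((List.range N).map (fun i => (List.range N).map (fun j => getCell matrix i j))).getD r []
      = (List.range N).map (fun j => getCell matrix r j) := by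
    rw [List.getD_eq_getElem _ _ (by simpa using hr), List.getElem_map]
    simp
  rw [getCell, h1, List.getD_eq_getElem _ _ (by simpa using hc), List.getElem_map]
  simp

theorem B_cell (matrix : List (List Int)) (N r c : Nat) (hodd : N % 2 = 1)
    (hr : r < N) (hc : c < N) :
    getCell (antiClock_alt matrix (N : Int)) r c
      = getCell matrix (TS N (r, c)).1 (TS N (r, c)).2 := by
  rw [antiClock_alt_bridge]
  set m0 := (List.range N).map (fun i => (List.range N).map (fun j => getCell matrix i j)) with hm0
  have s0 : Shape m0 N := m0B_shape matrix N
  set m1 := (List.range N).foldl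
    (fun m (i : Nat) => pySet2 m (i : Int) (i : Int) (getCell matrix i (N / 2))) m0
  set m2 := (List.range N).foldl
    (fun m (j : Nat) => pySet2 m ((N - 1 - j : Nat) : Int) (j : Int) (getCell matrix (N / 2) j)) m1
  set m3 := (List.range N).foldl
    (fun m (i : Nat) => pySet2 m (i : Int) ((N / 2 : Nat) : Int) (getCell matrix i (N - 1 - i))) m2
  have s1 : Shape m1 N := wf_shape _ (fun i => (i, i)) (fun i => getCell matrix i (N / 2)) _ _ s0
  have s2 : Shape m2 N :=
    wf_shape _ (fun j => (N - 1 - j, j)) (fun j => getCell matrix (N / 2) j) _ _ s1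
  have s3 : Shape m3 N :=
    wf_shape _ (fun i => (i, N / 2)) (fun i => getCell matrix i (N - 1 - i)) _ _ s2
  by_cases hr0 : r = N / 2
  · have h4 : getCell ((List.range N).foldl
        (fun m (i : Nat) => pySet2 m ((N / 2 : Nat) : Int) (i : Int) (getCell matrix i i)) m3) r c
        = getCell matrix c c :=
      wf_hit (List.range N) (fun i => (N / 2, i)) (fun i => getCell matrix i i) m3 N r c s3 hr hc
        (fun p _ q _ e => (Prod.ext_iff.mp e).2) c (List.mem_range.mpr hc) (by rw [hr0])
    rw [h4]
    simp [TS, hr0]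
  · have h4 : getCell ((List.range N).foldl
        (fun m (i : Nat) => pySet2 m ((N / 2 : Nat) : Int) (i : Int) (getCell matrix i i)) m3) r c
        = getCell m3 r c :=
      wf_miss (List.range N) (fun i => (N / 2, i)) (fun i => getCell matrix i i) m3 N r c s3 hr hc
        (fun i _ e => hr0 ((Prod.ext_iff.mp e).1).symm)
    rw [h4]
    by_cases hc0 : c = N / 2
    · have h3 : getCell m3 r c = getCell matrix r (N - 1 - r) :=
        wf_hit (List.range N) (fun i => (i, N / 2)) (fun i => getCell matrix i (N - 1 - i)) m2
          N r c s2 hr hc (fun p _ q _ e => (Prod.ext_iff.mp e).1) r (List.mem_range.mpr hr)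
          (by rw [hc0])
      rw [h3]
      simp [TS, hr0, hc0]
    · have h3 : getCell m3 r c = getCell m2 r c :=
        wf_miss (List.range N) (fun i => (i, N / 2)) (fun i => getCell matrix i (N - 1 - i)) m2
          N r c s2 hr hc (fun i _ e => hc0 ((Prod.ext_iff.mp e).2).symm)
      rw [h3]
      by_cases hrc : r = c
      · have h2 : getCell m2 r c = getCell m1 r c :=
          wf_miss (List.range N) (fun j => (N - 1 - j, j)) (fun j => getCell matrix (N / 2) j) m1
            N r c s1 hr hc
            (by
              intro j hj e
              have hj' : j < N := List.mem_range.mp hj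
              simp only [Prod.mk.injEq] at e
              obtain ⟨e1, e2⟩ := e
              exact hc0 (by omega))
        rw [h2]
        have h1 : getCell m1 r c = getCell matrix r (N / 2) :=
          wf_hit (List.range N) (fun i => (i, i)) (fun i => getCell matrix i (N / 2)) m0
            N r c s0 hr hc (fun p _ q _ e => (Prod.ext_iff.mp e).1) r (List.mem_range.mpr hr)
            (by rw [hrc])
        rw [h1]
        simp [TS, hc0, hrc]
      · by_cases had : r + c + 1 = N
        · have h2 : getCell m2 r c = getCell matrix (N / 2) c :=
            wf_hit (List.range N) (fun j => (N - 1 - j, j)) (fun j => getCell matrix (N / 2) j) m1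
              N r c s1 hr hc (fun p _ q _ e => (Prod.ext_iff.mp e).2) c (List.mem_range.mpr hc)
              (by
                show ((N - 1 - c : Nat), c) = (r, c)
                have : N - 1 - c = r := by omega
                rw [this])
          rw [h2]
          simp [TS, hr0, hc0, hrc, had]
        · have h2 : getCell m2 r c = getCell m1 r c :=
            wf_miss (List.range N) (fun j => (N - 1 - j, j)) (fun j => getCell matrix (N / 2) j) m1
              N r c s1 hr hc
              (by
                intro j hj e
                have hj' : j < N := List.mem_range.mp hj
                simp only [Prod.mk.injEq] at e
                obtain ⟨e1, e2⟩ := e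
                exact had (by omega))
          rw [h2]
          have h1 : getCell m1 r c = getCell m0 r c :=
            wf_miss (List.range N) (fun i => (i, i)) (fun i => getCell matrix i (N / 2)) m0
              N r c s0 hr hc (by
                intro i _ e
                simp only [Prod.mk.injEq] at e
                obtain ⟨e1, e2⟩ := e
                exact hrc (by omega))
          rw [h1, hm0, m0B_cell matrix N r c hr hc]
          simp [TS, hr0, hc0, hrc, had]

theorem antiClock_nil (matrix : List (List Int)) (n : Int) (h : n ≤ 0) :
    antiClock matrix n = [] := by
  unfold antiClock
  rw [PySem.List.pyRange_one_eq_nil h]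
  rfl

theorem antiClock_alt_nil (matrix : List (List Int)) (n : Int) (h : n ≤ 0) :
    antiClock_alt matrix n = [] := by
  unfold antiClock_alt
  rw [PySem.List.pyRange_one_eq_nil h]
  rfl

-- ===== VERDICT (by name: the statement is the Claim_ definition above) =====
theorem antiClock_spec : Claim_equal_antiClock := by
  intro matrix n _ hpre
  unfold Spec_antiClock
  by_cases hle : n ≤ 0
  · rw [antiClock_nil matrix n hle, antiClock_alt_nil matrix n hle]
  · have hodd' : n % 2 = 1 := by
      rcases hpre with h | ⟨h, _, _⟩
      · exact absurd h hle
      · exact h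
    have hpos : 0 < n := by omega
    set N := n.toNat with hN
    have hn : n = (N : Int) := by omega
    have hodd : N % 2 = 1 := by omega
    rw [hn]
    refine shape_ext _ _ N ?_ ?_ ?_
    · rw [antiClock_bridge]
      apply wf_shape
      constructor
      · simp
      · intro row hrow
        simp only [List.mem_map] at hrow
        obtain ⟨_, _, e⟩ := hrow
        simp [← e]
    · rw [antiClock_alt_bridge]
      exact wf_shape _ (fun i => (N / 2, i)) (fun i => getCell matrix i i) _ _
        (wf_shape _ (fun i => (i, N / 2)) (fun i => getCell matrix i (N - 1 - i)) _ _
          (wf_shape _ (fun j => (N - 1 - j, j)) (fun j => getCell matrix (N / 2) j) _ _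
            (wf_shape _ (fun i => (i, i)) (fun i => getCell matrix i (N / 2)) _ _
              (m0B_shape matrix N))))
    · intro r hr c hc
      rw [A_cell matrix N r c hodd hr hc, B_cell matrix N r c hodd hr hc]
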